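-- pv_equiv track=rewrite | github.com/francosalvucci14/Esercizi_ASD | Esami/Esame 30-1-22/SolEsame300122_es3.py | alg2
-- ===== SOURCE A (Python) =====
-- def alg2(a, b):
--     n = len(a)
--
--     x = [0]*n
--     y = [0]*n
--
--     x[0] = a[0]
--
--     b2 = b[::-1]
--     y[0] = b2[0]
--
--     for i in range(1, n):
--         x[i] = x[i-1] + a[i]
--         y[i] = y[i-1] + b2[i]
--
--     c = 0
--     for j in range(n):
--         if x[j] < y[j]:
--             c += 1
--     return c
-- ===== SOURCE B (Python) =====
-- def alg2(a, b):
--     c = 0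
--     xacc = yacc = 0
--     for i in range(len(a)):
--         xacc += a[i]
--         yacc += b[len(b) - 1 - i]
--         if xacc < yacc:
--             c += 1
--     return c
-- ===== Notes on version B (the rewrite author's own statement) =====
-- stated objective: simpler
-- what changed: Replaces the two preallocated prefix-sum arrays, the list reversal and the second counting pass by a single loop that keeps two running sums and counts on the fly.
import Mathlib
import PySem

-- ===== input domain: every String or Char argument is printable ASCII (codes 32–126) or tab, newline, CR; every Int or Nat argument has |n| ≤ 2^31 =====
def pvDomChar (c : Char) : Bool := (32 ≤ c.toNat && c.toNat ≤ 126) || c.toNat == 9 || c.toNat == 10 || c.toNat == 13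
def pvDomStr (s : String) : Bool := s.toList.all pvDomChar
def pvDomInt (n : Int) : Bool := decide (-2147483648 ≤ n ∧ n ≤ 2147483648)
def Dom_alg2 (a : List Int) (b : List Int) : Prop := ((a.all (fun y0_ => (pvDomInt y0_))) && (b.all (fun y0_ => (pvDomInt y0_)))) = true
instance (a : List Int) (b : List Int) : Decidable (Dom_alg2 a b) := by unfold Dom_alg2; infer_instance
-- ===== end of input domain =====

-- B replaces A's two preallocated prefix-sum arrays, the list reversal and the second counting pass
-- by a single loop keeping two running sums and a counter (objective: simpler, O(1) extra space).

-- ===== PORT A =====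
def alg2 (a : List Int) (b : List Int) : Int :=
  let n : Int := (a.length : Int)
  let x : List Int := List.replicate a.length 0
  let y : List Int := List.replicate a.length 0
  let x := PySem.List.pySetD x 0 (PySem.List.pyGetD a 0 0)
  let b2 : List Int := (PySem.List.slice? b none none (-1)).getD []
  let y := PySem.List.pySetD y 0 (PySem.List.pyGetD b2 0 0)
  let xy := (PySem.List.pyRange 1 n 1).foldl
      (fun (st : List Int × List Int) i =>
        (PySem.List.pySetD st.1 i (PySem.List.pyGetD st.1 (i - 1) 0 + PySem.List.pyGetD a i 0),
         PySem.List.pySetD st.2 i (PySem.List.pyGetD st.2 (i - 1) 0 + PySem.List.pyGetD b2 i 0)))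
      (x, y)
  (PySem.List.pyRange 0 n 1).foldl
      (fun c j => if PySem.List.pyGetD xy.1 j 0 < PySem.List.pyGetD xy.2 j 0 then c + 1 else c) 0

-- ===== PORT B =====
def alg2_alt (a : List Int) (b : List Int) : Int :=
  ((PySem.List.pyRange 0 (a.length : Int) 1).foldl
    (fun (st : Int × Int × Int) i =>
      let xacc := st.2.1 + PySem.List.pyGetD a i 0
      let yacc := st.2.2 + PySem.List.pyGetD b ((b.length : Int) - 1 - i) 0
      (if xacc < yacc then st.1 + 1 else st.1, xacc, yacc))
    (0, 0, 0)).1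

-- ===== PRECONDITION & SPEC =====
-- Pre_ excludes exactly the inputs where A raises IndexError: empty a (x[0] = a[0]) and
-- len(b) < len(a) (the access b2[i] in the first loop).
def Pre_alg2 (a : List Int) (b : List Int) : Prop := a ≠ [] ∧ a.length ≤ b.length
instance (a : List Int) (b : List Int) : Decidable (Pre_alg2 a b) := by unfold Pre_alg2; infer_instance
def pvWitness_alg2 : List Int × List Int := ([1], [2])
def Spec_alg2 (a : List Int) (b : List Int) (out : Int) : Prop := out = alg2_alt a b
instance (a : List Int) (b : List Int) (out : Int) : Decidable (Spec_alg2 a b out) := by unfold Spec_alg2; infer_instance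

-- ===== CLAIM (what is proved, stated in full; the proofs are below) =====
def Claim_equal_alg2 : Prop := ∀ (a : List Int) (b : List Int), Dom_alg2 a b → Pre_alg2 a b → Spec_alg2 a b (alg2 a b)

-- ===== LEMMAS AND PROOFS =====

-- prefix-sum list: pvPx a k = [sum a[0..0], sum a[0..1], …, sum a[0..k-1]]
def pvPx (a : List Int) (k : Nat) : List Int :=
  (List.range k).map (fun j => (a.take (j + 1)).sum)

-- the common value both ports compute
def pvCnt (a b2 : List Int) (n : Nat) : Int :=
  (List.range n).foldl
    (fun c j => if (a.take (j + 1)).sum < (b2.take (j + 1)).sum then c + 1 else c) 0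

lemma pv_sum_take_succ (l : List Int) (k : Nat) (h : k < l.length) :
    (l.take (k + 1)).sum = (l.take k).sum + l.getD k 0 := by
  rw [List.take_add_one, List.sum_append, List.getD_eq_getElem _ _ h,
    List.getElem?_eq_getElem h]
  simp

lemma pv_getD_px (a : List Int) (n k : Nat) (h : k < n) (tail : List Int) :
    (pvPx a n ++ tail).getD k 0 = (a.take (k + 1)).sum := by
  rw [List.getD_append _ _ _ _ (by simpa [pvPx] using h),
    pvPx, PySem.List.getD_map_range _ _ _ _ h]

lemma pv_px_snoc (a : List Int) (k : Nat) :
    pvPx a k ++ [(a.take (k + 1)).sum] = pvPx a (k + 1) := by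
  simp [pvPx, List.range_succ]

lemma pv_set_px (l : List Int) (m : Nat) (hm : 1 ≤ m) (v : Int) :
    (l ++ List.replicate m (0 : Int)).set l.length v
      = (l ++ [v]) ++ List.replicate (m - 1) 0 := by
  obtain ⟨m', rfl⟩ : ∃ m', m = m' + 1 := ⟨m - 1, by omega⟩
  simp [List.replicate_succ]

-- invariant of A's first loop (already rewritten as a fold over List.range)
lemma pvA_loop (a b2 : List Int) (hb : a.length ≤ b2.length) (r : Nat) (hr : r + 1 ≤ a.length) :
    (List.range r).foldl
      (fun (st : List Int × List Int) (k : Nat) =>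
        (PySem.List.pySetD st.1 (1 + (k : Int)) (PySem.List.pyGetD st.1 (1 + (k : Int) - 1) 0 + PySem.List.pyGetD a (1 + (k : Int)) 0),
         PySem.List.pySetD st.2 (1 + (k : Int)) (PySem.List.pyGetD st.2 (1 + (k : Int) - 1) 0 + PySem.List.pyGetD b2 (1 + (k : Int)) 0)))
      (pvPx a 1 ++ List.replicate (a.length - 1) 0, pvPx b2 1 ++ List.replicate (a.length - 1) 0)
    = (pvPx a (r + 1) ++ List.replicate (a.length - 1 - r) 0,
       pvPx b2 (r + 1) ++ List.replicate (a.length - 1 - r) 0) := by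
  induction r with
  | zero => simp
  | succ r ih =>
    rw [List.range_succ, List.foldl_append, ih (by omega), List.foldl_cons, List.foldl_nil]
    have h1 : (1 : Int) + (r : Int) - 1 = ((r : Nat) : Int) := by omega
    have h2 : (1 : Int) + (r : Int) = ((r + 1 : Nat) : Int) := by push_cast; ring
    have hlen : ∀ t : List Int, (pvPx t (r + 1)).length = r + 1 := by
      intro t; simp [pvPx]
    rw [h1, h2]
    simp only [PySem.List.pyGetD_natCast, PySem.List.pySetD_natCast]
    rw [pv_getD_px a (r + 1) r (by omega), pv_getD_px b2 (r + 1) r (by omega)]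
    have hsa : (a.take (r + 1)).sum + a.getD (r + 1) 0 = (a.take (r + 2)).sum :=
      (pv_sum_take_succ a (r + 1) (by omega)).symm
    have hsb : (b2.take (r + 1)).sum + b2.getD (r + 1) 0 = (b2.take (r + 2)).sum :=
      (pv_sum_take_succ b2 (r + 1) (by omega)).symm
    rw [hsa, hsb]
    have hset : ∀ t : List Int,
        (pvPx t (r + 1) ++ List.replicate (a.length - 1 - r) (0 : Int)).set (r + 1) ((t.take (r + 2)).sum)
          = pvPx t (r + 2) ++ List.replicate (a.length - 1 - (r + 1)) 0 := by
      intro t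
      have := pv_set_px (pvPx t (r + 1)) (a.length - 1 - r) (by omega) ((t.take (r + 2)).sum)
      rw [hlen t] at this
      rw [this, pv_px_snoc]
      congr 1
    rw [hset a, hset b2]

-- the counting fold over such a pair of prefix-sum lists is pvCnt
lemma pv_count_loop (a b2 : List Int) (n : Nat) (r : Nat) (hr : r ≤ n) :
    (List.range r).foldl
      (fun (c : Int) (j : Nat) =>
        if (pvPx a n ++ ([] : List Int)).getD j 0 < (pvPx b2 n ++ ([] : List Int)).getD j 0 then c + 1 else c)
      0 = pvCnt a b2 r := by
  induction r with
  | zero => simp [pvCnt]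
  | succ r ih =>
    rw [List.range_succ, List.foldl_append, ih (by omega), List.foldl_cons, List.foldl_nil]
    rw [pv_getD_px a n r (by omega), pv_getD_px b2 n r (by omega)]
    simp only [pvCnt]
    rw [List.range_succ, List.foldl_append, List.foldl_cons, List.foldl_nil]

-- A computes pvCnt
lemma pvA_eq (a b : List Int) (ha : a ≠ []) (hb : a.length ≤ b.length) :
    alg2 a b = pvCnt a b.reverse a.length := by
  obtain ⟨h, t, rfl⟩ := List.exists_cons_of_ne_nil ha
  simp only [alg2, PySem.List.slice?_none_none_neg_one, Option.getD_some]
  have hbne : b.reverse ≠ [] := by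
    intro hc; simp at hc; subst hc; simp at hb
  obtain ⟨bh, bt, hbr⟩ := List.exists_cons_of_ne_nil hbne
  rw [hbr]
  -- initial states
  have hx0 : PySem.List.pySetD (List.replicate (h :: t).length (0 : Int)) 0
      (PySem.List.pyGetD (h :: t) 0 0)
      = pvPx (h :: t) 1 ++ List.replicate ((h :: t).length - 1) 0 := by
    simp [PySem.List.pySetD_of_nonneg, PySem.List.pyGetD_zero_cons,
      List.replicate_succ, pvPx]
  have hy0 : PySem.List.pySetD (List.replicate (h :: t).length (0 : Int)) 0
      (PySem.List.pyGetD (bh :: bt) 0 0)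
      = pvPx (bh :: bt) 1 ++ List.replicate ((h :: t).length - 1) 0 := by
    simp [PySem.List.pySetD_of_nonneg, PySem.List.pyGetD_zero_cons,
      List.replicate_succ, pvPx]
  rw [hx0, hy0]
  have hblen : (h :: t).length ≤ (bh :: bt).length := by
    rw [← hbr]; simpa using hb
  -- first loop
  rw [PySem.List.pyRange_one, List.foldl_map]
  have hrng : (((h :: t).length : Int) - 1).toNat = (h :: t).length - 1 := by
    omega
  rw [hrng, pvA_loop (h :: t) (bh :: bt) hblen ((h :: t).length - 1) (by simp)]
  -- second loop
  rw [PySem.List.pyRange_zero_nat, List.foldl_map]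
  have hnn : (h :: t).length - 1 + 1 = (h :: t).length := by simp
  have hz : (h :: t).length - 1 - ((h :: t).length - 1) = 0 := by omega
  rw [hnn, hz, List.replicate_zero]
  simpa using pv_count_loop (h :: t) (bh :: bt) (h :: t).length (h :: t).length le_rfl

-- B computes pvCnt (with the running-sum invariant)
lemma pvB_loop (a b : List Int) (hb : a.length ≤ b.length) (r : Nat) (hr : r ≤ a.length) :
    (List.range r).foldl
      (fun (st : Int × Int × Int) (j : Nat) =>
        let xacc := st.2.1 + PySem.List.pyGetD a (j : Int) 0
        let yacc := st.2.2 + PySem.List.pyGetD b ((b.length : Int) - 1 - (j : Int)) 0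
        (if xacc < yacc then st.1 + 1 else st.1, xacc, yacc))
      (0, 0, 0)
    = (pvCnt a b.reverse r, (a.take r).sum, (b.reverse.take r).sum) := by
  induction r with
  | zero => simp [pvCnt]
  | succ r ih =>
    rw [List.range_succ, List.foldl_append, ih (by omega), List.foldl_cons, List.foldl_nil]
    have hidx : ((b.length : Int) - 1 - (r : Int)) = ((b.length - 1 - r : Nat) : Int) := by
      omega
    rw [hidx]
    simp only [PySem.List.pyGetD_natCast]
    have hrb : r < b.length := by omega
    have hgb : b.getD (b.length - 1 - r) 0 = b.reverse.getD r 0 := by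
      rw [List.getD_eq_getElem _ _ (by omega), List.getD_eq_getElem _ _ (by simpa using hrb)]
      rw [List.getElem_reverse]
    have hsa : (a.take r).sum + a.getD r 0 = (a.take (r + 1)).sum :=
      (pv_sum_take_succ a r (by omega)).symm
    have hsb : (b.reverse.take r).sum + b.reverse.getD r 0 = (b.reverse.take (r + 1)).sum :=
      (pv_sum_take_succ b.reverse r (by simpa using hrb)).symm
    simp only [hgb, hsa, hsb]
    simp only [pvCnt]
    rw [List.range_succ, List.foldl_append, List.foldl_cons, List.foldl_nil]

lemma pvB_eq (a b : List Int) (hb : a.length ≤ b.length) :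
    alg2_alt a b = pvCnt a b.reverse a.length := by
  simp only [alg2_alt, PySem.List.pyRange_zero_nat, List.foldl_map]
  rw [pvB_loop a b hb a.length le_rfl]

-- ===== VERDICT (by name: the statement is the Claim_ definition above) =====
theorem alg2_spec : Claim_equal_alg2 := by
  intro a b _ hpre
  unfold Spec_alg2
  rw [pvA_eq a b hpre.1 hpre.2, pvB_eq a b hpre.2]
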